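-- pv_equiv track=rewrite | github.com/academic-resources/stared-repos | Algorithms-I-Notes/practice_algs/squareroot.py | bar_expanded
-- ===== SOURCE A (Python) =====
-- def bar_expanded(n):
--     s = 0
--     i_count = []
--     j_count = []
--
--     for i in range(n):
--         i_count.append(i)
--         for j in range(n):
--             j_count.append(j)
--             s += i * j
--
--     return f's: {s}, i count: {len(i_count)}, j count: {len(j_count)}'
-- ===== SOURCE B (Python) =====
-- def bar_expanded(n):
--     m = n if n > 0 else 0
--     t = m * (m - 1) // 2
--     return f's: {t * t}, i count: {m}, j count: {m * m}'
-- ===== Notes on version B (the rewrite author's own statement) =====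
-- stated objective: faster
-- what changed: Replaces the nested O(n^2) loops and the two appended lists with closed forms: s = (n(n-1)/2)^2 via the Gauss sum, i count = n, j count = n^2 (0 for n <= 0).
import Mathlib
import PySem

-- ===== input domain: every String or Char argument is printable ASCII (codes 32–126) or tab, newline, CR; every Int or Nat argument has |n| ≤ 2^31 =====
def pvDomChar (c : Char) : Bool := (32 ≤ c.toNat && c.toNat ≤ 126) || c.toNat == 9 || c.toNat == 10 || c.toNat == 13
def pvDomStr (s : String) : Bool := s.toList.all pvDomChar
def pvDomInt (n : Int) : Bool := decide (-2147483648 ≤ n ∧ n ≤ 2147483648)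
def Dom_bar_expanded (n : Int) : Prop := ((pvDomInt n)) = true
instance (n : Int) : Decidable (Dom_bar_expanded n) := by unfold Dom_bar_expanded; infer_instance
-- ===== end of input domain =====

-- B replaces A's nested O(n^2) loops with the closed forms s = (n(n-1)/2)^2, counts n and n^2 (objective: faster).

-- ===== PORT A =====
def bar_expanded (n : Int) : String :=
  let res := (PySem.List.pyRange 0 n 1).foldl
    (fun (st : Int × List Int × List Int) i =>
      let ic := st.2.1 ++ [i]
      let inner := (PySem.List.pyRange 0 n 1).foldl
        (fun (p : Int × List Int) j => (p.1 + i * j, p.2 ++ [j])) (st.1, st.2.2)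
      (inner.1, ic, inner.2)) (0, [], [])
  "s: " ++ PySem.Int.toStr res.1 ++ ", i count: " ++ PySem.Int.toStr (res.2.1.length : Int)
    ++ ", j count: " ++ PySem.Int.toStr (res.2.2.length : Int)

-- ===== PORT B =====
def bar_expanded_alt (n : Int) : String :=
  let m : Int := if n > 0 then n else 0
  let t : Int := PySem.Int.floordiv (m * (m - 1)) 2
  "s: " ++ PySem.Int.toStr (t * t) ++ ", i count: " ++ PySem.Int.toStr m
    ++ ", j count: " ++ PySem.Int.toStr (m * m)

-- ===== PRECONDITION & SPEC =====
def Spec_bar_expanded (n : Int) (out : String) : Prop := out = bar_expanded_alt n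
instance (n : Int) (out : String) : Decidable (Spec_bar_expanded n out) := by unfold Spec_bar_expanded; infer_instance

-- ===== CLAIM (what is proved, stated in full; the proofs are below) =====
def Claim_equal_bar_expanded : Prop := ∀ (n : Int), Dom_bar_expanded n → Spec_bar_expanded n (bar_expanded n)

-- ===== LEMMAS AND PROOFS =====

theorem pv_inner_eq (L : List Int) (i s : Int) (jc : List Int) :
    L.foldl (fun (p : Int × List Int) j => (p.1 + i * j, p.2 ++ [j])) (s, jc)
      = (s + i * L.sum, jc ++ L) := by
  induction L generalizing s jc with
  | nil => simp
  | cons a t ih => simp [List.foldl, ih]; ring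

theorem pv_outer_body (R L : List Int) (init : Int × List Int × List Int) :
    L.foldl
      (fun (st : Int × List Int × List Int) i =>
        let ic' := st.2.1 ++ [i]
        let inner := R.foldl
          (fun (p : Int × List Int) j => (p.1 + i * j, p.2 ++ [j])) (st.1, st.2.2)
        (inner.1, ic', inner.2)) init
      = L.foldl (fun (st : Int × List Int × List Int) i =>
          (st.1 + i * R.sum, st.2.1 ++ [i], st.2.2 ++ R)) init := by
  congr 1
  funext st i
  simp [pv_inner_eq]

theorem pv_outer_eq (R L : List Int) (s : Int) (ic jc : List Int) :
    L.foldl (fun (st : Int × List Int × List Int) i =>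
        (st.1 + i * R.sum, st.2.1 ++ [i], st.2.2 ++ R)) (s, ic, jc)
      = (s + L.sum * R.sum, ic ++ L, jc ++ (List.replicate L.length R).flatten) := by
  induction L generalizing s ic jc with
  | nil => simp
  | cons a t ih =>
    simp only [List.foldl_cons, ih, List.sum_cons, List.length_cons, List.replicate_succ,
      List.flatten_cons]
    refine Prod.ext (by simp; ring) (Prod.ext (by simp) (by simp))

theorem pv_sum_pyRange (m : Nat) :
    2 * (PySem.List.pyRange 0 (m : Int) 1).sum = (m : Int) * ((m : Int) - 1) := by
  induction m with
  | zero => simp [PySem.List.pyRange_one_eq_nil]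
  | succ k ih =>
    rw [show ((k + 1 : Nat) : Int) = (k : Int) + 1 by push_cast; ring,
      PySem.List.pyRange_one_succ_right (show (0:Int) ≤ (k:Int) by omega)]
    simp only [List.sum_append, List.sum_cons, List.sum_nil]
    linear_combination ih

-- ===== VERDICT (by name: the statement is the Claim_ definition above) =====
theorem bar_expanded_spec : Claim_equal_bar_expanded := by
  intro n _
  unfold Spec_bar_expanded bar_expanded bar_expanded_alt
  rw [pv_outer_body, pv_outer_eq]
  by_cases hn : n > 0
  · have hS : PySem.Int.floordiv (n * (n - 1)) 2
        = (PySem.List.pyRange 0 n 1).sum := by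
      have h1 := pv_sum_pyRange n.toNat
      rw [Int.toNat_of_nonneg (le_of_lt hn)] at h1
      rw [← h1, PySem.Int.floordiv_eq_ediv_of_pos (by norm_num),
        Int.mul_ediv_cancel_left _ (by norm_num)]
    have hlen : ((PySem.List.pyRange 0 n 1).length : Int) = n := by
      rw [PySem.List.length_pyRange_one]
      simp [Int.toNat_of_nonneg (le_of_lt hn)]
    have hj : (((List.replicate (PySem.List.pyRange 0 n 1).length
        (PySem.List.pyRange 0 n 1)).flatten.length : Int)) = n * n := by
      simp only [List.length_flatten, List.map_replicate, List.sum_replicate, smul_eq_mul]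
      push_cast
      rw [hlen]
    simp only [if_pos hn, List.nil_append, zero_add, hlen, hj, hS]
  · rw [PySem.List.pyRange_one_eq_nil (by omega)]
    simp only [if_neg hn, List.sum_nil, List.length_nil, List.replicate_zero,
      List.flatten_nil, List.nil_append, List.length_nil, mul_zero, zero_mul, add_zero]
    norm_num [PySem.Int.floordiv]
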